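-- pv_equiv track=rewrite | github.com/intel/torch-xpu-ops | .github/pytorch-agent/pytorch_agent/fixing_steps/implement.py | _parse_issue_sections
-- ===== SOURCE A (Python) =====
-- def _parse_issue_sections(body: str) -> dict[str, str]:
--     """Parse structured issue body from CI failure template into sections."""
--     sections: dict[str, str] = {}
--     current_key = None
--     current_lines: list[str] = []
--
--     for line in (body or "").split("\n"):
--         # GitHub renders template fields as ### headings
--         if line.startswith("### "):
--             if current_key:
--                 sections[current_key] = "\n".join(current_lines).strip()
--             current_key = line[4:].strip()
--             current_lines = []
--         elif current_key is not None:
--             current_lines.append(line)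
--
--     if current_key:
--         sections[current_key] = "\n".join(current_lines).strip()
--
--     return sections
-- ===== SOURCE B (Python) =====
-- def _parse_issue_sections(body: str) -> dict[str, str]:
--     """Parse structured issue body from CI failure template into sections."""
--     sections: dict[str, str] = {}
--     lines = (body or "").split("\n")
--     n = len(lines)
--     i = 0
--     while i < n:
--         if lines[i].startswith("### "):
--             j = i + 1
--             while j < n and not lines[j].startswith("### "):
--                 j += 1
--             key = lines[i][4:].strip()
--             if key:
--                 sections[key] = "\n".join(lines[i + 1:j]).strip()
--             i = j
--         else:
--             i += 1
--     return sections
-- ===== Notes on version B (the rewrite author's own statement) =====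
-- stated objective: alternative
-- what changed: Replaces A's single stateful pass (current_key/current_lines accumulator with flush-on-heading and a trailing flush) by a span-based scan: at each heading line, scan forward to the next heading and assign key/content directly, with no carried accumulator state and no post-loop flush.
import Mathlib
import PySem

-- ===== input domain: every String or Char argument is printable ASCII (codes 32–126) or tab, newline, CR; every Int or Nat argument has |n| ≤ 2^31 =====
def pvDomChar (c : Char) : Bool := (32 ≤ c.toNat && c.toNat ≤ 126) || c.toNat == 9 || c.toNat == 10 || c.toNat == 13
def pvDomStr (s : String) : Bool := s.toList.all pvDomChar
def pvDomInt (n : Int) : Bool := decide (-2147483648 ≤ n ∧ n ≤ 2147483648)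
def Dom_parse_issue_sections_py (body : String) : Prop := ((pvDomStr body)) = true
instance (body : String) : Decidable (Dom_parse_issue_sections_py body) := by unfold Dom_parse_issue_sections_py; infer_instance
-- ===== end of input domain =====

-- B replaces A's accumulator-and-flush pass by a span-based scan over heading blocks (alternative decomposition, same O(n) cost).

-- ===== PORT A =====
-- body.split("\n"): sep "\n" is nonempty so Str.split? is always `some`; the getD default is unreachable
def pvSplitLines (body : String) : List String :=
  (PySem.Str.split? body "\n").getD []

-- Python `if current_key:` (truthy: not None and nonempty) guarding each dict store, used at flush and after the loop
def pvFlush (sections : PySem.Dict String String) (ck : Option String) (cl : List String) :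
    PySem.Dict String String :=
  match ck with
  | some k => if k ≠ "" then sections.insert k (PySem.Str.strip (PySem.Str.join "\n" cl)) else sections
  | none => sections

-- the loop body of A: state = (sections, current_key, current_lines)
def pvAStep (st : PySem.Dict String String × Option String × List String) (line : String) :
    PySem.Dict String String × Option String × List String :=
  if PySem.Str.startswith line "### " then
    (pvFlush st.1 st.2.1 st.2.2, some (PySem.Str.strip (PySem.Str.slice line (some 4) none)), [])
  else
    match st.2.1 with
    | some _ => (st.1, st.2.1, st.2.2 ++ [line])
    | none => st

def parse_issue_sections_py (body : String) : List (String × String) :=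
  let st := (pvSplitLines (if body ≠ "" then body else "")).foldl pvAStep
      (PySem.Dict.empty, none, [])
  (pvFlush st.1 st.2.1 st.2.2).items

-- ===== PORT B =====
-- the outer while loop of B; the inner `while j < n and not heading` index scan is takeWhile/dropWhile on the remaining lines
def pvAltGo (lines : List String) (sections : PySem.Dict String String) : PySem.Dict String String :=
  match lines with
  | [] => sections
  | l :: rest =>
    if PySem.Str.startswith l "### " then
      let content := rest.takeWhile (fun x => !PySem.Str.startswith x "### ")
      let rest' := rest.dropWhile (fun x => !PySem.Str.startswith x "### ")
      let key := PySem.Str.strip (PySem.Str.slice l (some 4) none)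
      pvAltGo rest'
        (if key ≠ "" then sections.insert key (PySem.Str.strip (PySem.Str.join "\n" content))
         else sections)
    else pvAltGo rest sections
termination_by lines.length
decreasing_by
  · exact Nat.lt_succ_of_le (List.length_dropWhile_le _ _)
  · exact Nat.lt_succ_self _

def parse_issue_sections_py_alt (body : String) : List (String × String) :=
  (pvAltGo (pvSplitLines (if body ≠ "" then body else "")) PySem.Dict.empty).items

-- ===== PRECONDITION & SPEC =====
def Spec_parse_issue_sections_py (body : String) (out : List (String × String)) : Prop := out = parse_issue_sections_py_alt body
instance (body : String) (out : List (String × String)) : Decidable (Spec_parse_issue_sections_py body out) := by unfold Spec_parse_issue_sections_py; infer_instance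

-- ===== CLAIM (what is proved, stated in full; the proofs are below) =====
def Claim_equal_parse_issue_sections_py : Prop := ∀ (body : String), Dom_parse_issue_sections_py body → Spec_parse_issue_sections_py body (parse_issue_sections_py body)

-- ===== LEMMAS AND PROOFS =====

-- the trailing flush after A's loop, as one function of the loop state
def pvFinish (st : PySem.Dict String String × Option String × List String) :
    PySem.Dict String String :=
  pvFlush st.1 st.2.1 st.2.2

-- invariant while inside a section (current_key = some k): the rest of A's fold, finished, equals
-- B's scan from the next heading, with the pending lines flushed together with the lines up to it
theorem pv_mid (lines : List String) : ∀ (d : PySem.Dict String String) (k : String) (cl : List String),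
    pvFinish (lines.foldl pvAStep (d, some k, cl)) =
      pvAltGo (lines.dropWhile (fun x => !PySem.Str.startswith x "### "))
        (pvFlush d (some k) (cl ++ lines.takeWhile (fun x => !PySem.Str.startswith x "### "))) := by
  induction lines with
  | nil => intro d k cl; simp [pvAltGo, pvFinish]
  | cons l ls ih =>
    intro d k cl
    by_cases h : PySem.Chars.startswith l.toList ['#', '#', '#', ' '] = true
    · rw [List.foldl_cons,
        show pvAStep (d, some k, cl) l =
          (pvFlush d (some k) cl, some (PySem.Str.strip (PySem.Str.slice l (some 4) none)), [])
          from by simp [pvAStep, h],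
        ih]
      simp [pvAltGo, pvFlush, h]
    · rw [List.foldl_cons,
        show pvAStep (d, some k, cl) l = (d, some k, cl ++ [l]) from by simp [pvAStep, h],
        ih]
      simp [h]

-- before the first heading (current_key = None): A's fold, finished, equals B's scan
theorem pv_pre (lines : List String) : ∀ (d : PySem.Dict String String),
    pvFinish (lines.foldl pvAStep (d, none, [])) = pvAltGo lines d := by
  induction lines with
  | nil => intro d; simp [pvAltGo, pvFinish, pvFlush]
  | cons l ls ih =>
    intro d
    by_cases h : PySem.Chars.startswith l.toList ['#', '#', '#', ' '] = true
    · rw [List.foldl_cons,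
        show pvAStep (d, none, []) l =
          (d, some (PySem.Str.strip (PySem.Str.slice l (some 4) none)), [])
          from by simp [pvAStep, pvFlush, h],
        pv_mid ls]
      simp [pvAltGo, pvFlush, h]
    · rw [List.foldl_cons,
        show pvAStep (d, none, []) l = (d, none, []) from by simp [pvAStep, h],
        ih]
      simp [pvAltGo, h]

-- ===== VERDICT (by name: the statement is the Claim_ definition above) =====
theorem parse_issue_sections_py_spec : Claim_equal_parse_issue_sections_py := by
  intro body _
  unfold Spec_parse_issue_sections_py parse_issue_sections_py parse_issue_sections_py_alt
  exact congrArg PySem.Dict.items (pv_pre _ _)
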